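-- pv_equiv track=rewrite | github.com/Ninnat/graph-state-verification | graph_verify.py | intToSymplec
-- ===== SOURCE A (Python) =====
-- def intToSymplec(j,n,XZ = None):
--     if j == 0:
--         return ([0]*n + [1]*n)
--     vec = [0]*n + [1]*n # symplectic vector (X,Z)
--     k = 0
--     if XZ == 1:
--         while j:
--             if int(j % 2) == 0:
--                 vec[-1-n-k],vec[-1-k] = 0,1
--             if int(j % 2) == 1:
--                 vec[-1-n-k],vec[-1-k] = 1,0
--             j //= 2
--             k += 1
--     else:
--         while j:
--             if int(j % 3) == 0:
--                 vec[-1-n-k],vec[-1-k] = 0,1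
--             if int(j % 3) == 1:
--                 vec[-1-n-k],vec[-1-k] = 1,0
--             if int(j % 3) == 2:
--                 vec[-1-n-k],vec[-1-k] = 1,1
--             j //= 3
--             k += 1
--     return(vec)
-- ===== SOURCE B (Python) =====
-- def intToSymplec(j, n, XZ=None):
--     # Closed-form: the symplectic pair at qubit i depends only on the base-b digit
--     # (j // base**(n-1-i)) % base; no digit-extraction loop, no mutation. Digits at
--     # exponents e >= j.bit_length() are 0 (base**e > j there), so those powers are skipped.
--     base = 2 if XZ == 1 else 3
--     L = j.bit_length()
--     X = [0 if n-1-i >= L or (j // base ** (n-1-i)) % base == 0 else 1 for i in range(n)]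
--     Z = [0 if n-1-i < L and (j // base ** (n-1-i)) % base == 1 else 1 for i in range(n)]
--     return X + Z
-- ===== Notes on version B (the rewrite author's own statement) =====
-- stated objective: alternative
-- what changed: A sequentially extracts digits in a while-loop and mutates a preallocated vector through negative-index writes; B is a closed-form positional construction: each of the 2n entries is computed independently from the digit (j // base**(n-1-i)) % base by two comprehensions (with a j.bit_length() guard marking the exponents whose digit is 0), with no digit loop, no mutation and no reversal.
import Mathlib
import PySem

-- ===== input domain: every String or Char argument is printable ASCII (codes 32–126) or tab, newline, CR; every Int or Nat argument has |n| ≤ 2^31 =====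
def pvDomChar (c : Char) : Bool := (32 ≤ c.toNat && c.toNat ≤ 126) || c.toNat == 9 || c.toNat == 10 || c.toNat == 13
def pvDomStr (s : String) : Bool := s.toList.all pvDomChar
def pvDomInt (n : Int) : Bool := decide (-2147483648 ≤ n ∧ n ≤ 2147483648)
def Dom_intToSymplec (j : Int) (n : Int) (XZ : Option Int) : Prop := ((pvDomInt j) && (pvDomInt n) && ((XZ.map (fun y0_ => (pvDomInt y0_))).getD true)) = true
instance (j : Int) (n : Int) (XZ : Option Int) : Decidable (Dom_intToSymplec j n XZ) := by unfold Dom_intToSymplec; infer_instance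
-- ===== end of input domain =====

-- B replaces A's sequential digit-extraction loop with in-place negative-index writes by a
-- closed-form positional construction: entry i is computed independently from
-- (j // base**(n-1-i)) % base (objective: alternative).

-- ===== PORT A =====
-- Python negative-index list assignment vec[i] = v; where Python would raise IndexError the
-- vector is returned unchanged (those inputs are excluded by Pre_intToSymplec).
def pySetNeg (xs : List Int) (i : Int) (v : Int) : List Int :=
  let i' : Int := if i < 0 then (xs.length : Int) + i else i
  if 0 ≤ i' ∧ i' < (xs.length : Int) then xs.set i'.toNat v else xs

-- the `while j:` loop of the XZ == 1 branch; the loop variable is a Nat because the Python loop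
-- terminates only for j ≥ 0 (Pre_intToSymplec requires 0 ≤ j; Python diverges on negative j);
-- `fuel` (started at j, an upper bound on the iteration count) is only a structural-termination
-- guard: the `| 0, j+1` branch is never reached
def loopA2 (n : Int) : Nat → Nat → Int → List Int → List Int
  | _, 0, _, vec => vec
  | 0, _+1, _, vec => vec
  | f+1, j+1, k, vec =>
    let vec1 := if (j+1) % 2 = 0 then pySetNeg (pySetNeg vec (-1-n-k) 0) (-1-k) 1 else vec
    let vec2 := if (j+1) % 2 = 1 then pySetNeg (pySetNeg vec1 (-1-n-k) 1) (-1-k) 0 else vec1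
    loopA2 n f ((j+1)/2) (k+1) vec2

-- the `while j:` loop of the else (base-3) branch
def loopA3 (n : Int) : Nat → Nat → Int → List Int → List Int
  | _, 0, _, vec => vec
  | 0, _+1, _, vec => vec
  | f+1, j+1, k, vec =>
    let vec1 := if (j+1) % 3 = 0 then pySetNeg (pySetNeg vec (-1-n-k) 0) (-1-k) 1 else vec
    let vec2 := if (j+1) % 3 = 1 then pySetNeg (pySetNeg vec1 (-1-n-k) 1) (-1-k) 0 else vec1
    let vec3 := if (j+1) % 3 = 2 then pySetNeg (pySetNeg vec2 (-1-n-k) 1) (-1-k) 1 else vec2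
    loopA3 n f ((j+1)/3) (k+1) vec3

def intToSymplec (j : Int) (n : Int) (XZ : Option Int) : List Int :=
  if j = 0 then List.replicate n.toNat 0 ++ List.replicate n.toNat 1
  else
    let vec := List.replicate n.toNat 0 ++ List.replicate n.toNat 1
    if XZ = some 1 then loopA2 n j.toNat j.toNat 0 vec else loopA3 n j.toNat j.toNat 0 vec

-- ===== PORT B =====
-- Source B: two independent comprehensions over range(n); entry i of each is a closed-form
-- function of the digit (j // base**(n-1-i)) % base, ported with PySem.Int.floordiv/mod
-- (exact Python // and %) and j.bit_length() as PySem.Int.bitLength; the exponent n-1-i is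
-- ≥ 0 for i ∈ range(n), so Nat subtraction n.toNat - 1 - i is exact; the `or`/`and`
-- short-circuits become the nested if / conjunction
def intToSymplec_alt (j : Int) (n : Int) (XZ : Option Int) : List Int :=
  let base : Int := if XZ = some 1 then 2 else 3
  let L := PySem.Int.bitLength j
  ((List.range n.toNat).map (fun i =>
      if L ≤ n.toNat - 1 - i then (0:Int)
      else if PySem.Int.mod (PySem.Int.floordiv j (base ^ (n.toNat - 1 - i))) base = 0 then 0 else 1))
  ++ ((List.range n.toNat).map (fun i =>
      if n.toNat - 1 - i < L ∧ PySem.Int.mod (PySem.Int.floordiv j (base ^ (n.toNat - 1 - i))) base = 1 then (0:Int) else 1))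

-- ===== PRECONDITION & SPEC =====
-- Pre_ excludes exactly the inputs on which A does not return: on j < 0 the while loop never
-- terminates (j //= base converges to -1), and on j > 0 with more base-`base` digits than n
-- (j ≥ base^n, including any n ≤ 0) the negative-index assignment raises IndexError.
def Pre_intToSymplec (j : Int) (n : Int) (XZ : Option Int) : Prop :=
  0 ≤ j ∧ (j = 0 ∨ (0 ≤ n ∧ j < (if XZ = some 1 then 2 else 3) ^ n.toNat))
instance (j : Int) (n : Int) (XZ : Option Int) : Decidable (Pre_intToSymplec j n XZ) := by unfold Pre_intToSymplec; infer_instance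
def pvWitness_intToSymplec : Int × Int × Option Int := (5, 3, none)

def Spec_intToSymplec (j : Int) (n : Int) (XZ : Option Int) (out : List Int) : Prop := out = intToSymplec_alt j n XZ
instance (j : Int) (n : Int) (XZ : Option Int) (out : List Int) : Decidable (Spec_intToSymplec j n XZ out) := by unfold Spec_intToSymplec; infer_instance

-- ===== CLAIM (what is proved, stated in full; the proofs are below) =====
def Claim_equal_intToSymplec : Prop := ∀ (j : Int) (n : Int) (XZ : Option Int), Dom_intToSymplec j n XZ → Pre_intToSymplec j n XZ → Spec_intToSymplec j n XZ (intToSymplec j n XZ)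

-- ===== LEMMAS AND PROOFS =====

-- proof-side intermediate form: the base-b digit pairs of m, LSB first (fuel-guarded; never
-- exhausted for f ≥ m), and their right-aligned assembly into a 2n-vector
def bDigits (base : Nat) : Nat → Nat → List (Int × Int)
  | _, 0 => []
  | 0, _+1 => []
  | f+1, j+1 =>
    let d := (j+1) % base
    ((if d = 0 then (0 : Int) else 1), (if d = 1 then (0 : Int) else 1)) :: bDigits base f ((j+1)/base)

def bBuild (n : Int) (ps : List (Int × Int)) : List Int :=
  let pad := (n - (ps.length : Int)).toNat
  List.replicate pad 0 ++ (ps.map Prod.fst).reverse ++ List.replicate pad 1 ++ (ps.map Prod.snd).reverse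

-- proof-side: A's loop as a fold over the digit-pair list
def applyPairs (n : Int) : List (Int × Int) → Int → List Int → List Int
  | [], _, vec => vec
  | p :: ps, k, vec => applyPairs n ps (k+1) (pySetNeg (pySetNeg vec (-1-n-k) p.1) (-1-k) p.2)

-- proof-side: successive sets at positions N-1-k, N-1-(k+1), … within one half
def foldSet (N : Nat) : List Int → Nat → List Int → List Int
  | [], _, X => X
  | d :: ds, k, X => foldSet N ds (k+1) (X.set (N-1-k) d)

theorem pySetNeg_neg (xs : List Int) (i v : Int) (h1 : i < 0) (h2 : 0 ≤ (xs.length : Int) + i) :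
    pySetNeg xs i v = xs.set ((xs.length : Int) + i).toNat v := by
  unfold pySetNeg
  simp only [if_pos h1]
  rw [if_pos ⟨h2, by omega⟩]

theorem pySetNeg_halves (N : Nat) (X Z : List Int) (k : Nat) (x z : Int)
    (hX : X.length = N) (hZ : Z.length = N) (hk : k < N) :
    pySetNeg (pySetNeg (X ++ Z) (-1-(N:Int)-(k:Int)) x) (-1-(k:Int)) z
      = X.set (N-1-k) x ++ Z.set (N-1-k) z := by
  have hlen1 : ((X ++ Z).length : Int) = (N : Int) + N := by simp [hX, hZ]
  have h1 : pySetNeg (X ++ Z) (-1-(N:Int)-(k:Int)) x = X.set (N-1-k) x ++ Z := by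
    rw [pySetNeg_neg _ _ _ (by omega) (by omega), hlen1]
    have hidx : ((N : Int) + N + (-1-(N:Int)-(k:Int))).toNat = N - 1 - k := by omega
    have hset : (X ++ Z).set (N-1-k) x = X.set (N-1-k) x ++ Z :=
      List.set_append_left _ _ (by omega)
    rw [hidx, hset]
  rw [h1]
  have hlen2 : ((X.set (N-1-k) x ++ Z).length : Int) = (N : Int) + N := by simp [hX, hZ]
  rw [pySetNeg_neg _ _ _ (by omega) (by omega), hlen2]
  have hidx : ((N : Int) + N + (-1-(k:Int))).toNat = N + (N - 1 - k) := by omega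
  have hset : (X.set (N-1-k) x ++ Z).set (N + (N - 1 - k)) z
      = X.set (N-1-k) x ++ Z.set (N + (N - 1 - k) - (X.set (N-1-k) x).length) z :=
    List.set_append_right _ _ (by simp [hX])
  rw [hidx, hset]
  have hsub : N + (N - 1 - k) - (X.set (N-1-k) x).length = N - 1 - k := by simp [hX]
  rw [hsub]

theorem loopA2_eq (n : Int) : ∀ (f j : Nat) (k : Int) (vec : List Int), j ≤ f →
    loopA2 n f j k vec = applyPairs n (bDigits 2 f j) k vec := by
  intro f
  induction f with
  | zero => intro j k vec hj; interval_cases j; rfl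
  | succ f ih =>
    intro j k vec hj
    match j with
    | 0 => rfl
    | j+1 =>
      have hd : (j+1) % 2 = 0 ∨ (j+1) % 2 = 1 := by omega
      have hrec : (j+1) / 2 ≤ f := by omega
      rcases hd with hd | hd <;>
        simp only [loopA2, bDigits, applyPairs, hd, reduceCtorEq] <;>
        rw [ih _ _ _ hrec] <;> norm_num [hd]

theorem loopA3_eq (n : Int) : ∀ (f j : Nat) (k : Int) (vec : List Int), j ≤ f →
    loopA3 n f j k vec = applyPairs n (bDigits 3 f j) k vec := by
  intro f
  induction f with
  | zero => intro j k vec hj; interval_cases j; rfl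
  | succ f ih =>
    intro j k vec hj
    match j with
    | 0 => rfl
    | j+1 =>
      have hd : (j+1) % 3 = 0 ∨ (j+1) % 3 = 1 ∨ (j+1) % 3 = 2 := by omega
      have hrec : (j+1) / 3 ≤ f := by omega
      rcases hd with hd | hd | hd <;>
        simp only [loopA3, bDigits, applyPairs, hd] <;>
        rw [ih _ _ _ hrec] <;> norm_num [hd]

theorem applyPairs_halves (N : Nat) : ∀ (ps : List (Int × Int)) (k : Nat) (X Z : List Int),
    X.length = N → Z.length = N → k + ps.length ≤ N →
    applyPairs (N : Int) ps (k : Int) (X ++ Z)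
      = foldSet N (ps.map Prod.fst) k X ++ foldSet N (ps.map Prod.snd) k Z := by
  intro ps
  induction ps with
  | nil => intro k X Z _ _ _; rfl
  | cons p ps ih =>
    intro k X Z hX hZ hk
    have hkN : k < N := by simp at hk; omega
    simp only [applyPairs, List.map_cons, foldSet]
    rw [pySetNeg_halves N X Z k p.1 p.2 hX hZ hkN]
    have : (k : Int) + 1 = ((k+1 : Nat) : Int) := by push_cast; ring
    rw [this, ih (k+1) _ _ (by simp [hX]) (by simp [hZ]) (by simp at hk ⊢; omega)]

theorem foldSet_eq (N : Nat) : ∀ (ds : List Int) (k : Nat) (X : List Int),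
    X.length = N → k + ds.length ≤ N →
    foldSet N ds k X = X.take (N - k - ds.length) ++ ds.reverse ++ X.drop (N - k) := by
  intro ds
  induction ds with
  | nil => intro k X hX hk; simp [foldSet, List.take_append_drop]
  | cons d ds ih =>
    intro k X hX hk
    simp only [List.length_cons] at hk
    have hkN : k < N := by omega
    simp only [foldSet]
    rw [ih (k+1) _ (by simp [hX]) (by omega)]
    have htake : (X.set (N-1-k) d).take (N - (k+1) - ds.length) = X.take (N - (k+1) - ds.length) :=
      List.take_set_of_le (by omega)
    have hdrop1 : (X.set (N-1-k) d).drop (N - (k+1)) =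
        (X.set (N-1-k) d)[N-1-k]'(by simp [hX]; omega) :: (X.set (N-1-k) d).drop (N-k) := by
      have h1 : N - (k+1) = N - 1 - k := by omega
      have h2 : N - 1 - k + 1 = N - k := by omega
      rw [h1, List.drop_eq_getElem_cons (by simp [hX]; omega), h2]
    have hget : (X.set (N-1-k) d)[N-1-k]'(by simp [hX]; omega) = d :=
      List.getElem_set_self (by simp [hX]; omega)
    have hdrop2 : (X.set (N-1-k) d).drop (N-k) = X.drop (N-k) :=
      List.drop_set_of_lt (by omega)
    rw [htake, hdrop1, hget, hdrop2]
    have hlen : N - (k+1) - ds.length = N - k - (ds.length + 1) := by omega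
    simp [hlen, List.append_assoc]

theorem bDigits_length_le (base : Nat) (hb : 2 ≤ base) : ∀ (N : Nat) (f m : Nat),
    m ≤ f → m < base ^ N → (bDigits base f m).length ≤ N := by
  intro N
  induction N with
  | zero => intro f m _ hm; simp at hm; subst hm; cases f <;> simp [bDigits]
  | succ N ih =>
    intro f m hmf hm
    match f, m with
    | _, 0 => cases f <;> simp [bDigits]
    | f+1, m+1 =>
      simp only [bDigits, List.length_cons]
      have h1 : (m+1) / base ≤ f := by
        have := Nat.div_lt_self (show 0 < m+1 by omega) hb
        omega
      have h2 : (m+1) / base < base ^ N := by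
        rw [Nat.div_lt_iff_lt_mul (by omega)]
        calc m + 1 < base ^ (N+1) := hm
        _ = base ^ N * base := by ring
      have := ih f ((m+1)/base) h1 h2
      omega

-- A = the right-aligned assembly of the digit pairs (extracted from A's loop lemmas)
theorem A_eq_bBuild (j n : Int) (XZ : Option Int) (hj : 0 < j) (hn : 0 ≤ n)
    (hlt : j < (if XZ = some 1 then 2 else 3) ^ n.toNat) :
    intToSymplec j n XZ
      = bBuild n (bDigits (if XZ = some 1 then 2 else 3) j.toNat j.toNat) := by
  set b : Nat := if XZ = some 1 then 2 else 3 with hbdef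
  have hb : 2 ≤ b := by rw [hbdef]; split <;> omega
  set N := n.toNat with hNdef
  set m := j.toNat with hmdef
  have hnN : n = (N : Int) := by omega
  have hmj : (m : Int) = j := by omega
  have hmlt : m < b ^ N := by
    by_cases hxz : XZ = some 1
    · have hb2 : b = 2 := by simp [hbdef, hxz]
      rw [if_pos hxz] at hlt
      have hc : ((2:Int))^N = ((2^N : Nat) : Int) := by push_cast; ring
      rw [hc] at hlt; rw [hb2]; omega
    · have hb3 : b = 3 := by simp [hbdef, hxz]
      rw [if_neg hxz] at hlt
      have hc : ((3:Int))^N = ((3^N : Nat) : Int) := by push_cast; ring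
      rw [hc] at hlt; rw [hb3]; omega
  have hD := bDigits_length_le b hb N m m (le_refl m) hmlt
  set ps := bDigits b m m with hps
  set D := ps.length with hDdef
  have hA : intToSymplec j n XZ =
      applyPairs n ps 0 (List.replicate N 0 ++ List.replicate N 1) := by
    rw [intToSymplec, if_neg (by omega)]
    rw [hbdef] at hps
    split
    · rename_i hxz
      rw [loopA2_eq n m m 0 _ (le_refl m)]
      rw [hps, if_pos hxz]
    · rename_i hxz
      rw [loopA3_eq n m m 0 _ (le_refl m)]
      rw [hps, if_neg hxz]
  rw [hA, hnN]
  have h0 : (0 : Int) = ((0 : Nat) : Int) := rfl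
  rw [h0, applyPairs_halves N ps 0 _ _ (by simp) (by simp) (by omega)]
  rw [foldSet_eq N _ 0 _ (by simp) (by simp [← hDdef]; omega)]
  rw [foldSet_eq N _ 0 _ (by simp) (by simp [← hDdef]; omega)]
  rw [bBuild]
  simp only [← hDdef]
  simp [List.take_replicate, List.drop_replicate, ← hDdef,
    show N - D ≤ N by omega, List.append_assoc]

-- positional characterization of the digit pairs
theorem bDigits_getElem (base : Nat) (hb : 2 ≤ base) : ∀ (f m : Nat), m ≤ f →
    ∀ (k : Nat) (hk : k < (bDigits base f m).length),
    (bDigits base f m)[k]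
      = ((if (m / base^k) % base = 0 then (0:Int) else 1),
         (if (m / base^k) % base = 1 then (0:Int) else 1)) := by
  intro f
  induction f with
  | zero => intro m hm; interval_cases m; intro k hk; simp [bDigits] at hk
  | succ f ih =>
    intro m hm k hk
    match m with
    | 0 => simp [bDigits] at hk
    | m+1 =>
      match k with
      | 0 => simp [bDigits]
      | k+1 =>
        have hrec : (m+1) / base ≤ f := by
          have := Nat.div_lt_self (show 0 < m+1 by omega) hb
          omega
        have hk' : k < (bDigits base f ((m+1)/base)).length := by
          simp only [bDigits, List.length_cons] at hk; omega
        simp only [bDigits, List.getElem_cons_succ]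
        rw [ih ((m+1)/base) hrec k hk']
        have hdd : (m+1) / base / base ^ k = (m+1) / base ^ (k+1) := by
          rw [Nat.div_div_eq_div_mul, ← pow_succ']
        rw [hdd]

theorem bDigits_lt (base : Nat) (hb : 2 ≤ base) : ∀ (f m : Nat), m ≤ f →
    m < base ^ (bDigits base f m).length := by
  intro f
  induction f with
  | zero => intro m hm; interval_cases m; simp [bDigits]
  | succ f ih =>
    intro m hm
    match m with
    | 0 => simp [bDigits]
    | m+1 =>
      have hrec : (m+1) / base ≤ f := by
        have := Nat.div_lt_self (show 0 < m+1 by omega) hb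
        omega
      have := ih ((m+1)/base) hrec
      simp only [bDigits, List.length_cons]
      have hdm := Nat.div_add_mod (m+1) base
      have hmod : (m+1) % base < base := Nat.mod_lt _ (by omega)
      calc m + 1 = base * ((m+1)/base) + (m+1) % base := (Nat.div_add_mod _ _).symm
        _ < base * ((m+1)/base + 1) := by
            have hdist : base * ((m+1)/base + 1) = base * ((m+1)/base) + base := by ring
            omega
        _ ≤ base * base ^ (bDigits base f ((m+1)/base)).length :=
            Nat.mul_le_mul_left base this
        _ = base ^ ((bDigits base f ((m+1)/base)).length + 1) := (pow_succ' base _).symm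

-- generic: a right-aligned padded reversed list equals a positional map over range N
theorem pad_rev_eq (c : Int) (L : List Int) (N : Nat) (F : Nat → Int) (hD : L.length ≤ N)
    (hpad : ∀ i, i < N - L.length → F i = c)
    (hdig : ∀ (i : Nat) (h1 : N - L.length ≤ i) (h2 : i < N), F i = L[N-1-i]'(by omega)) :
    List.replicate (N - L.length) c ++ L.reverse = (List.range N).map F := by
  apply List.ext_getElem
  · simp; omega
  · intro i hi1 hi2
    simp only [List.getElem_map, List.getElem_range]
    by_cases hc : i < N - L.length
    · rw [List.getElem_append_left (by simpa using hc), List.getElem_replicate, hpad i hc]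
    · have hiN : i < N := by simpa using hi2
      rw [List.getElem_append_right (by simpa using hc)]
      rw [hdig i (by omega) hiN]
      simp only [List.getElem_reverse]
      congr 1
      simp only [List.length_replicate]
      omega

-- the assembly equals B's closed-form positional construction
theorem bBuild_eq_alt (base : Nat) (hb : 2 ≤ base) (f m : Nat) (n : Int) (hmf : m ≤ f)
    (hD : (bDigits base f m).length ≤ n.toNat) :
    bBuild n (bDigits base f m)
      = ((List.range n.toNat).map (fun i =>
            if PySem.Int.bitLength (m : Int) ≤ n.toNat - 1 - i then (0:Int)
            else if PySem.Int.mod (PySem.Int.floordiv (m : Int) ((base : Int) ^ (n.toNat - 1 - i))) (base : Int) = 0 then 0 else 1))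
        ++ ((List.range n.toNat).map (fun i =>
            if n.toNat - 1 - i < PySem.Int.bitLength (m : Int) ∧ PySem.Int.mod (PySem.Int.floordiv (m : Int) ((base : Int) ^ (n.toNat - 1 - i))) (base : Int) = 1 then (0:Int) else 1)) := by
  set N := n.toNat with hNdef
  have hmD : m < base ^ (bDigits base f m).length := bDigits_lt base hb f m hmf
  have hdigit : ∀ (i : Nat),
      PySem.Int.mod (PySem.Int.floordiv (m : Int) ((base : Int) ^ (N - 1 - i))) (base : Int)
        = (((m / base ^ (N-1-i)) % base : Nat) : Int) := by
    intro i
    have hcast : ((base : Int)) ^ (N - 1 - i) = ((base ^ (N-1-i) : Nat) : Int) := by push_cast; ring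
    rw [hcast, PySem.Int.floordiv_natCast, PySem.Int.mod_natCast]
  have hzero : ∀ (i : Nat), i < N - (bDigits base f m).length → m / base ^ (N-1-i) = 0 := by
    intro i hi
    apply Nat.div_eq_of_lt
    exact lt_of_lt_of_le hmD (Nat.pow_le_pow_right (by omega) (by omega))
  have hX : List.replicate (N - (bDigits base f m).length) (0:Int)
        ++ ((bDigits base f m).map Prod.fst).reverse
      = (List.range N).map (fun i =>
          if PySem.Int.mod (PySem.Int.floordiv (m : Int) ((base : Int) ^ (N - 1 - i))) (base : Int) = 0 then (0:Int) else 1) := by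
    have h := pad_rev_eq 0 ((bDigits base f m).map Prod.fst) N
        (fun i => if PySem.Int.mod (PySem.Int.floordiv (m : Int) ((base : Int) ^ (N - 1 - i))) (base : Int) = 0 then (0:Int) else 1)
        (by simpa using hD)
        (by intro i hi
            simp only [List.length_map] at hi
            dsimp only
            rw [hdigit i, hzero i hi]
            simp)
        (by intro i h1 h2
            simp only [List.length_map] at h1
            dsimp only
            rw [hdigit i, List.getElem_map,
              bDigits_getElem base hb f m hmf (N-1-i) (by omega)]
            simp only [Nat.cast_eq_zero])
    simpa only [List.length_map] using h
  have hZ : List.replicate (N - (bDigits base f m).length) (1:Int)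
        ++ ((bDigits base f m).map Prod.snd).reverse
      = (List.range N).map (fun i =>
          if PySem.Int.mod (PySem.Int.floordiv (m : Int) ((base : Int) ^ (N - 1 - i))) (base : Int) = 1 then (0:Int) else 1) := by
    have h := pad_rev_eq 1 ((bDigits base f m).map Prod.snd) N
        (fun i => if PySem.Int.mod (PySem.Int.floordiv (m : Int) ((base : Int) ^ (N - 1 - i))) (base : Int) = 1 then (0:Int) else 1)
        (by simpa using hD)
        (by intro i hi
            simp only [List.length_map] at hi
            dsimp only
            rw [hdigit i, hzero i hi]
            simp)
        (by intro i h1 h2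
            simp only [List.length_map] at h1
            dsimp only
            rw [hdigit i, List.getElem_map,
              bDigits_getElem base hb f m hmf (N-1-i) (by omega)]
            simp only [Nat.cast_eq_one])
    simpa only [List.length_map] using h
  have hgd : ∀ e : Nat, PySem.Int.bitLength (m : Int) ≤ e → m / base ^ e = 0 := by
    intro e he
    apply Nat.div_eq_of_lt
    have h1 : m < 2 ^ PySem.Int.bitLength (m : Int) := by
      have := PySem.Int.lt_two_pow_bitLength (m : Int)
      simpa using this
    calc m < 2 ^ PySem.Int.bitLength (m : Int) := h1
      _ ≤ 2 ^ e := Nat.pow_le_pow_right (by omega) he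
      _ ≤ base ^ e := Nat.pow_le_pow_left (by omega) e
  have hXg : (List.range N).map (fun i =>
        if PySem.Int.bitLength (m : Int) ≤ N - 1 - i then (0:Int)
        else if PySem.Int.mod (PySem.Int.floordiv (m : Int) ((base : Int) ^ (N - 1 - i))) (base : Int) = 0 then 0 else 1)
      = (List.range N).map (fun i =>
        if PySem.Int.mod (PySem.Int.floordiv (m : Int) ((base : Int) ^ (N - 1 - i))) (base : Int) = 0 then (0:Int) else 1) := by
    apply List.map_congr_left
    intro i _
    by_cases hg : PySem.Int.bitLength (m : Int) ≤ N - 1 - i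
    · rw [if_pos hg, hdigit i, hgd _ hg]
      simp
    · rw [if_neg hg]
  have hZg : (List.range N).map (fun i =>
        if N - 1 - i < PySem.Int.bitLength (m : Int) ∧ PySem.Int.mod (PySem.Int.floordiv (m : Int) ((base : Int) ^ (N - 1 - i))) (base : Int) = 1 then (0:Int) else 1)
      = (List.range N).map (fun i =>
        if PySem.Int.mod (PySem.Int.floordiv (m : Int) ((base : Int) ^ (N - 1 - i))) (base : Int) = 1 then (0:Int) else 1) := by
    apply List.map_congr_left
    intro i _
    by_cases hg : N - 1 - i < PySem.Int.bitLength (m : Int)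
    · simp [hg]
    · rw [hdigit i, hgd _ (by omega)]
      simp
  rw [bBuild]
  have hpad : ((n : Int) - (((bDigits base f m).length : Nat) : Int)).toNat
      = N - (bDigits base f m).length := by omega
  rw [hpad, hXg, hZg, ← hX, ← hZ]
  simp [List.append_assoc]

-- ===== VERDICT (by name: the statement is the Claim_ definition above) =====
theorem intToSymplec_spec : Claim_equal_intToSymplec := by
  intro j n XZ _ hpre
  unfold Spec_intToSymplec
  obtain ⟨hj, hc⟩ := hpre
  set b : Nat := if XZ = some 1 then 2 else 3 with hbdef
  have hb : 2 ≤ b := by rw [hbdef]; split <;> omega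
  have hbcast : ((if XZ = some 1 then (2:Int) else 3)) = (b : Int) := by
    rw [hbdef]; split <;> norm_num
  have hmj : ((j.toNat : Nat) : Int) = j := by omega
  by_cases hj0 : j = 0
  · subst hj0
    rw [intToSymplec]
    have h1 : intToSymplec_alt 0 n XZ = bBuild n (bDigits b 0 0) := by
      rw [intToSymplec_alt]
      simp only [hbcast]
      rw [bBuild_eq_alt b hb 0 0 n (le_refl 0) (by simp [bDigits])]
      norm_num
    rw [h1]
    simp [bBuild, bDigits]
  · obtain ⟨hn, hlt⟩ := hc.resolve_left hj0
    rw [A_eq_bBuild j n XZ (by omega) hn hlt]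
    have hmlt : j.toNat < b ^ n.toNat := by
      by_cases hxz : XZ = some 1
      · have hb2 : b = 2 := by simp [hbdef, hxz]
        rw [if_pos hxz] at hlt
        have hc2 : ((2:Int))^n.toNat = ((2^n.toNat : Nat) : Int) := by push_cast; ring
        rw [hc2] at hlt; rw [hb2]; omega
      · have hb3 : b = 3 := by simp [hbdef, hxz]
        rw [if_neg hxz] at hlt
        have hc3 : ((3:Int))^n.toNat = ((3^n.toNat : Nat) : Int) := by push_cast; ring
        rw [hc3] at hlt; rw [hb3]; omega
    have hD := bDigits_length_le b hb n.toNat j.toNat j.toNat (le_refl _) hmlt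
    rw [← hbdef]
    rw [bBuild_eq_alt b hb j.toNat j.toNat n (le_refl _) hD]
    rw [intToSymplec_alt]
    simp only [hbcast, hmj]
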